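-- pv_equiv track=rewrite | github.com/jjaspe/python | Problem_502_Counting_Castles.py | getNextArrayOfEvenCastlesPerHeight
-- ===== SOURCE A (Python) =====
-- def getNextArrayOfEvenCastlesPerHeight(totalHeight, previousArrayOfEvenCastles, previousArrayOfOddCastles):
--     evenCastlesByHeight=[]
--     evenStart=0
--     for index in range(totalHeight+1):
--         if index%2==0:
--             evenStart=0
--         else:
--             evenStart=1
--         # the (eventStart-1)^2 is to turn eventStart from 0 to 1 and from 1 to 0
--         partialEvenSumAlternating=[previousArrayOfEvenCastles[x] for x in range(evenStart,index-2+1,2)]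
--         partialOddSumAlternating=[previousArrayOfOddCastles[x] for x in range((evenStart-1)**2,index-1+1,2)]
--         evenCastlesByHeight.append(sum(partialEvenSumAlternating)+\
--                                        sum(previousArrayOfEvenCastles[index:])+\
--                                        sum(partialOddSumAlternating))
--     return evenCastlesByHeight
-- ===== SOURCE B (Python) =====
-- def getNextArrayOfEvenCastlesPerHeight(totalHeight, previousArrayOfEvenCastles, previousArrayOfOddCastles):
--     E = previousArrayOfEvenCastles
--     O = previousArrayOfOddCastles
--     suffix = sum(E)          # sum(E[i:]) maintained incrementally
--     evenE = oddE = evenO = oddO = 0   # parity-split prefix sums of E and O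
--     result = []
--     for i in range(totalHeight + 1):
--         if i % 2 == 0:
--             result.append(evenE + suffix + oddO)
--         else:
--             result.append(oddE + suffix + evenO)
--         if i < len(E):
--             suffix -= E[i]
--             if i % 2 == 0:
--                 evenE += E[i]
--             else:
--                 oddE += E[i]
--         if i < len(O):
--             if i % 2 == 0:
--                 evenO += O[i]
--             else:
--                 oddO += O[i]
--     return result
-- ===== Notes on version B (the rewrite author's own statement) =====
-- stated objective: faster
-- what changed: Replaces A's per-index strided list comprehensions and suffix-slice sums (O(n^2)) by a single pass that maintains parity-split prefix sums of both arrays and an incrementally updated suffix sum (O(n)).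
import Mathlib
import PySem

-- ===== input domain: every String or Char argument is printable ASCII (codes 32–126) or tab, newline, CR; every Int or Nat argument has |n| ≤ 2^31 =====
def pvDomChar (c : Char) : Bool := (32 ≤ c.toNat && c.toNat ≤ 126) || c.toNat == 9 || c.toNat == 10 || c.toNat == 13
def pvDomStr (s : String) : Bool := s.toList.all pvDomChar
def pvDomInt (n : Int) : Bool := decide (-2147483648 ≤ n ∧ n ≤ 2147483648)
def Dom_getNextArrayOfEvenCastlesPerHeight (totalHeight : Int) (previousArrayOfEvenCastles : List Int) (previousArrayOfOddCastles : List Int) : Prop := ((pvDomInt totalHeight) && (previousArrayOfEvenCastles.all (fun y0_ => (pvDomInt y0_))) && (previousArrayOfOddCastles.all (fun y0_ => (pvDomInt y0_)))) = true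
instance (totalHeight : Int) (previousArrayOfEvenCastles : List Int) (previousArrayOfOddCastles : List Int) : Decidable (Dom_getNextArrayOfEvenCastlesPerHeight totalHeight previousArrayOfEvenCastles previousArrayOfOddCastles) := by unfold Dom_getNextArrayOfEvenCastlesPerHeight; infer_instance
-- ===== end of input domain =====

-- B replaces A's per-index strided comprehensions and suffix slices (quadratic) by one pass
-- maintaining parity-split prefix sums and a running suffix sum (linear); return values agree on Pre_.

-- ===== PORT A =====
-- value appended for one `index` of A's loop (A indexes with previousArray[x]: IndexError → default
-- is never used inside Pre_, which guarantees every x is in range)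
def aBody (previousArrayOfEvenCastles : List Int) (previousArrayOfOddCastles : List Int) (index : Int) : Int :=
  let evenStart : Int := if PySem.Int.mod index 2 = 0 then 0 else 1
  let partialEvenSumAlternating :=
    (PySem.List.pyRange evenStart (index - 2 + 1) 2).map
      (fun x => PySem.List.pyGetD previousArrayOfEvenCastles x 0)
  let partialOddSumAlternating :=
    (PySem.List.pyRange ((evenStart - 1) ^ 2) (index - 1 + 1) 2).map
      (fun x => PySem.List.pyGetD previousArrayOfOddCastles x 0)
  partialEvenSumAlternating.sum
    + (PySem.List.slice previousArrayOfEvenCastles (some index) none).sum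
    + partialOddSumAlternating.sum

def getNextArrayOfEvenCastlesPerHeight (totalHeight : Int) (previousArrayOfEvenCastles : List Int) (previousArrayOfOddCastles : List Int) : List Int :=
  (PySem.List.pyRange 0 (totalHeight + 1) 1).foldl
    (fun evenCastlesByHeight index =>
      evenCastlesByHeight ++ [aBody previousArrayOfEvenCastles previousArrayOfOddCastles index])
    []

-- ===== PORT B =====
-- one iteration of B's loop; state = (result, suffix, evenE, oddE, evenO, oddO)
def altStep (E : List Int) (O : List Int)
    (st : List Int × Int × Int × Int × Int × Int) (i : Int) :
    List Int × Int × Int × Int × Int × Int :=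
  let (result, suffix, evenE, oddE, evenO, oddO) := st
  let result :=
    if PySem.Int.mod i 2 = 0 then result ++ [evenE + suffix + oddO]
    else result ++ [oddE + suffix + evenO]
  let (suffix, evenE, oddE) :=
    if i < (E.length : Int) then
      let e := PySem.List.pyGetD E i 0
      (suffix - e, (if PySem.Int.mod i 2 = 0 then evenE + e else evenE),
        (if PySem.Int.mod i 2 = 0 then oddE else oddE + e))
    else (suffix, evenE, oddE)
  let (evenO, oddO) :=
    if i < (O.length : Int) then
      let o := PySem.List.pyGetD O i 0
      ((if PySem.Int.mod i 2 = 0 then evenO + o else evenO),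
        (if PySem.Int.mod i 2 = 0 then oddO else oddO + o))
    else (evenO, oddO)
  (result, suffix, evenE, oddE, evenO, oddO)

def getNextArrayOfEvenCastlesPerHeight_alt (totalHeight : Int) (previousArrayOfEvenCastles : List Int) (previousArrayOfOddCastles : List Int) : List Int :=
  ((PySem.List.pyRange 0 (totalHeight + 1) 1).foldl
    (altStep previousArrayOfEvenCastles previousArrayOfOddCastles)
    ([], previousArrayOfEvenCastles.sum, 0, 0, 0, 0)).1

-- ===== PRECONDITION & SPEC =====
-- exactly the inputs on which Python A returns (otherwise previousArray[x] raises IndexError)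
def Pre_getNextArrayOfEvenCastlesPerHeight (totalHeight : Int) (previousArrayOfEvenCastles : List Int) (previousArrayOfOddCastles : List Int) : Prop :=
  totalHeight < 1 ∨
    (totalHeight - 1 ≤ (previousArrayOfEvenCastles.length : Int) ∧
      totalHeight ≤ (previousArrayOfOddCastles.length : Int))
instance (totalHeight : Int) (previousArrayOfEvenCastles : List Int) (previousArrayOfOddCastles : List Int) : Decidable (Pre_getNextArrayOfEvenCastlesPerHeight totalHeight previousArrayOfEvenCastles previousArrayOfOddCastles) := by unfold Pre_getNextArrayOfEvenCastlesPerHeight; infer_instance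

def pvWitness_getNextArrayOfEvenCastlesPerHeight : Int × List Int × List Int := (3, [1, 2, 3], [4, 5, 6])

def Spec_getNextArrayOfEvenCastlesPerHeight (totalHeight : Int) (previousArrayOfEvenCastles : List Int) (previousArrayOfOddCastles : List Int) (out : List Int) : Prop := out = getNextArrayOfEvenCastlesPerHeight_alt totalHeight previousArrayOfEvenCastles previousArrayOfOddCastles
instance (totalHeight : Int) (previousArrayOfEvenCastles : List Int) (previousArrayOfOddCastles : List Int) (out : List Int) : Decidable (Spec_getNextArrayOfEvenCastlesPerHeight totalHeight previousArrayOfEvenCastles previousArrayOfOddCastles out) := by unfold Spec_getNextArrayOfEvenCastlesPerHeight; infer_instance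

-- ===== CLAIM (what is proved, stated in full; the proofs are below) =====
def Claim_equal_getNextArrayOfEvenCastlesPerHeight : Prop := ∀ (totalHeight : Int) (previousArrayOfEvenCastles : List Int) (previousArrayOfOddCastles : List Int), Dom_getNextArrayOfEvenCastlesPerHeight totalHeight previousArrayOfEvenCastles previousArrayOfOddCastles → Pre_getNextArrayOfEvenCastlesPerHeight totalHeight previousArrayOfEvenCastles previousArrayOfOddCastles → Spec_getNextArrayOfEvenCastlesPerHeight totalHeight previousArrayOfEvenCastles previousArrayOfOddCastles (getNextArrayOfEvenCastlesPerHeight totalHeight previousArrayOfEvenCastles previousArrayOfOddCastles)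


-- ===== LEMMAS AND PROOFS =====

-- sPar L p m = sum of L.getD x 0 over x < m with x % 2 = p (the parity-split prefix sums B maintains)
def sPar (L : List Int) (p : Nat) : Nat → Int
  | 0 => 0
  | m + 1 => sPar L p m + (if m % 2 = p then L.getD m 0 else 0)

-- the common closed form of the element both programs put at position k
def gfun (E : List Int) (O : List Int) (k : Nat) : Int :=
  if k % 2 = 0 then sPar E 0 k + (E.drop k).sum + sPar O 1 k
  else sPar E 1 k + (E.drop k).sum + sPar O 0 k

lemma sPar_eq_sum_range (L : List Int) (p : Nat) (hp : p ≤ 1) (m : Nat) :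
    sPar L p m = ((List.range ((m + 1 - p) / 2)).map (fun k => L.getD (p + 2 * k) 0)).sum := by
  induction m with
  | zero =>
    interval_cases p <;> simp [sPar]
  | succ m ih =>
    by_cases h : m % 2 = p
    · have hc : (m + 1 + 1 - p) / 2 = (m + 1 - p) / 2 + 1 := by omega
      have hm : p + 2 * ((m + 1 - p) / 2) = m := by omega
      simp [sPar, h, ih, hc, List.range_succ, hm]
    · have hc : (m + 1 + 1 - p) / 2 = (m + 1 - p) / 2 := by omega
      simp [sPar, h, ih, hc]

lemma mod_natCast (i : Nat) : PySem.Int.mod (i : Int) 2 = ((i % 2 : Nat) : Int) := by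
  rw [PySem.Int.mod_eq_emod_of_pos (by norm_num : (0 : Int) < 2)]
  omega

lemma sum_drop_succ (E : List Int) (m : Nat) (h : m < E.length) :
    (E.drop m).sum = E.getD m 0 + (E.drop (m + 1)).sum := by
  rw [List.drop_eq_getElem_cons h, List.sum_cons, List.getD_eq_getElem E 0 h]

lemma sum_drop_succ_ge (E : List Int) (m : Nat) (h : ¬ m < E.length) :
    (E.drop (m + 1)).sum = (E.drop m).sum := by
  rw [List.drop_of_length_le (by omega), List.drop_of_length_le (by omega)]

-- a strided range-sum of A rewritten as a sum over List.range
lemma strided_sum (L : List Int) (p c : Nat) (a b : Int)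
    (ha : a = (p : Int))
    (hc : (if a < b then ((b - a + 2 - 1) / 2).toNat else 0) = c) :
    ((PySem.List.pyRange a b 2).map (fun x => PySem.List.pyGetD L x 0)).sum
      = ((List.range c).map (fun k => L.getD (p + 2 * k) 0)).sum := by
  subst ha
  rw [PySem.List.pyRange_of_pos (p : Int) b (by norm_num), hc, List.map_map]
  congr 1
  apply List.map_congr_left
  intro k _
  simp only [Function.comp_apply]
  have h : ((p : Int) + 2 * (k : Int)) = ((p + 2 * k : Nat) : Int) := by push_cast; ring
  rw [h, PySem.List.pyGetD_natCast]

-- A's per-index value equals the closed form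
lemma aBody_eq (E O : List Int) (i : Nat) : aBody E O (i : Int) = gfun E O i := by
  have hmod := mod_natCast i
  rcases Nat.even_or_odd i with hi | hi
  · have h2 : i % 2 = 0 := Nat.even_iff.mp hi
    have hstart : (if PySem.Int.mod (i : Int) 2 = 0 then (0 : Int) else 1) = 0 := by
      rw [hmod, h2]; simp
    have hsq : ((0 : Int) - 1) ^ 2 = 1 := by norm_num
    have hpes :=
      (strided_sum E 0 ((i + 1 - 0) / 2) 0 ((i : Int) - 2 + 1) (by norm_num)
        (by split <;> omega)).trans (sPar_eq_sum_range E 0 (by omega) i).symm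
    have hpos :=
      (strided_sum O 1 ((i + 1 - 1) / 2) 1 ((i : Int) - 1 + 1) (by norm_num)
        (by split <;> omega)).trans (sPar_eq_sum_range O 1 (by omega) i).symm
    have key : aBody E O (i : Int) = sPar E 0 i + (E.drop i).sum + sPar O 1 i := by
      simp only [aBody, hstart, hsq, hpes, hpos, PySem.List.slice_from_natCast]
    rw [key]
    simp [gfun, h2]
  · have h2 : i % 2 = 1 := Nat.odd_iff.mp hi
    have hstart : (if PySem.Int.mod (i : Int) 2 = 0 then (0 : Int) else 1) = 1 := by
      rw [hmod, h2]; simp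
    have hsq : ((1 : Int) - 1) ^ 2 = 0 := by norm_num
    have hpes :=
      (strided_sum E 1 ((i + 1 - 1) / 2) 1 ((i : Int) - 2 + 1) (by norm_num)
        (by split <;> omega)).trans (sPar_eq_sum_range E 1 (by omega) i).symm
    have hpos :=
      (strided_sum O 0 ((i + 1 - 0) / 2) 0 ((i : Int) - 1 + 1) (by norm_num)
        (by split <;> omega)).trans (sPar_eq_sum_range O 0 (by omega) i).symm
    have key : aBody E O (i : Int) = sPar E 1 i + (E.drop i).sum + sPar O 0 i := by
      simp only [aBody, hstart, hsq, hpes, hpos, PySem.List.slice_from_natCast]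
    rw [key]
    simp [gfun, h2]

-- altStep on an explicit state tuple, all lets resolved
lemma altStep_apply (E O : List Int) (r : List Int) (s a b c d : Int) (i : Int) :
    altStep E O (r, s, a, b, c, d) i =
      ((if PySem.Int.mod i 2 = 0 then r ++ [a + s + d] else r ++ [b + s + c]),
       (if i < (E.length : Int) then s - PySem.List.pyGetD E i 0 else s),
       (if i < (E.length : Int) then (if PySem.Int.mod i 2 = 0 then a + PySem.List.pyGetD E i 0 else a) else a),
       (if i < (E.length : Int) then (if PySem.Int.mod i 2 = 0 then b else b + PySem.List.pyGetD E i 0) else b),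
       (if i < (O.length : Int) then (if PySem.Int.mod i 2 = 0 then c + PySem.List.pyGetD O i 0 else c) else c),
       (if i < (O.length : Int) then (if PySem.Int.mod i 2 = 0 then d else d + PySem.List.pyGetD O i 0) else d)) := by
  unfold altStep
  by_cases h1 : PySem.Int.mod i 2 = 0 <;> by_cases h2 : i < (E.length : Int) <;>
    by_cases h3 : i < (O.length : Int) <;> simp [h1, h2, h3]

-- B's fold invariant: after m iterations the state holds the closed forms
lemma altFold (E O : List Int) (m : Nat) :
    ((List.range m).map (fun k : Nat => (k : Int))).foldl (altStep E O) ([], E.sum, 0, 0, 0, 0)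
      = ((List.range m).map (gfun E O), (E.drop m).sum,
          sPar E 0 m, sPar E 1 m, sPar O 0 m, sPar O 1 m) := by
  induction m with
  | zero => simp [sPar]
  | succ m ih =>
    rw [List.range_succ, List.map_append, List.foldl_append, ih]
    simp only [List.map_cons, List.map_nil, List.foldl_cons, List.foldl_nil, altStep_apply]
    rw [mod_natCast]
    have hcast : ((m : Int) < (E.length : Int)) = (m < E.length) := by
      simp [Nat.cast_lt]
    have hcastO : ((m : Int) < (O.length : Int)) = (m < O.length) := by
      simp [Nat.cast_lt]
    simp only [Prod.mk.injEq]
    rcases Nat.even_or_odd m with hm | hm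
    · have h2 : m % 2 = 0 := Nat.even_iff.mp hm
      refine ⟨?_, ?_, ?_, ?_, ?_, ?_⟩
      · simp [h2, List.range_succ, gfun]
      · by_cases hE : m < E.length
        · simp only [hcast, hE, if_true, PySem.List.pyGetD_natCast]
          rw [sum_drop_succ E m hE]; ring
        · simp only [hcast, hE, if_false]
          rw [sum_drop_succ_ge E m hE]
      · by_cases hE : m < E.length
        · simp [hcast, hE, h2, sPar, PySem.List.pyGetD_natCast]
        · simp [hcast, hE, h2, sPar, List.getD_eq_default _ _ (by omega : E.length ≤ m)]
      · by_cases hE : m < E.length <;> simp [hcast, hE, h2, sPar]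
      · by_cases hO : m < O.length
        · simp [hcastO, hO, h2, sPar, PySem.List.pyGetD_natCast]
        · simp [hcastO, hO, h2, sPar, List.getD_eq_default _ _ (by omega : O.length ≤ m)]
      · by_cases hO : m < O.length <;> simp [hcastO, hO, h2, sPar]
    · have h2 : m % 2 = 1 := Nat.odd_iff.mp hm
      refine ⟨?_, ?_, ?_, ?_, ?_, ?_⟩
      · simp [h2, List.range_succ, gfun]
      · by_cases hE : m < E.length
        · simp only [hcast, hE, if_true, PySem.List.pyGetD_natCast]
          rw [sum_drop_succ E m hE]; ring
        · simp only [hcast, hE, if_false]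
          rw [sum_drop_succ_ge E m hE]
      · by_cases hE : m < E.length <;> simp [hcast, hE, h2, sPar]
      · by_cases hE : m < E.length
        · simp [hcast, hE, h2, sPar, PySem.List.pyGetD_natCast]
        · simp [hcast, hE, h2, sPar, List.getD_eq_default _ _ (by omega : E.length ≤ m)]
      · by_cases hO : m < O.length <;> simp [hcastO, hO, h2, sPar]
      · by_cases hO : m < O.length
        · simp [hcastO, hO, h2, sPar, PySem.List.pyGetD_natCast]
        · simp [hcastO, hO, h2, sPar, List.getD_eq_default _ _ (by omega : O.length ≤ m)]

-- both ports equal (List.range (T+1).toNat).map (gfun E O)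
lemma ports_eq (T : Int) (E O : List Int) :
    getNextArrayOfEvenCastlesPerHeight T E O = getNextArrayOfEvenCastlesPerHeight_alt T E O := by
  unfold getNextArrayOfEvenCastlesPerHeight getNextArrayOfEvenCastlesPerHeight_alt
  have hr : PySem.List.pyRange 0 (T + 1) 1
      = (List.range (T + 1 - 0).toNat).map (fun k : Nat => (k : Int)) := by
    rw [PySem.List.pyRange_one]
    simp
  rw [hr, PySem.List.foldl_append_singleton_eq_map, altFold, List.map_map]
  simp only [List.nil_append]
  apply List.map_congr_left
  intro k _
  exact aBody_eq E O k

-- ===== VERDICT (by name: the statement is the Claim_ definition above) =====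
theorem getNextArrayOfEvenCastlesPerHeight_spec : Claim_equal_getNextArrayOfEvenCastlesPerHeight := by
  intro T E O _ _
  unfold Spec_getNextArrayOfEvenCastlesPerHeight
  exact ports_eq T E O
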